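-- pv_equiv track=rewrite | github.com/talkad/OMPify | CompCoder/eval/metrics.py | omp_valid_pragma
-- ===== SOURCE A (Python) =====
-- def omp_valid_paren(pragma):
--     '''
--     Balanced non-canonical parentheses
--     '''
--     count = 0
--
--     for ch in pragma:
--         if count < 0 or count > 1:
--             return False
--
--         if ch == '(':
--             count += 1
--         elif ch == ')':
--             count -= 1
--
--     return count == 0
--
-- def omp_valid_pragma(pragma):
--     clause_vars = ['private', 'reduction', 'collapse', 'schedule', 'shared', 'default', 'aligned', 'num_threads']
--
--     if not omp_valid_paren(pragma):
--         return False
--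
--     # parentheses after clause
--     paren_indexes = [idx for idx, ch in enumerate(pragma) if ch =='(']
--     for idx in paren_indexes:
--         if all([not pragma[:idx].rstrip().endswith(clause) for clause in clause_vars]):
--             return False
--
--     # clause before parentheses
--     for clause in clause_vars[:2]:
--         idx = pragma.find(clause)
--
--         if idx == -1: continue
--
--         if not pragma[idx+len(clause):].lstrip().startswith('('):
--             return False
--
--         if clause == 'reduction':
--             reduction_part = pragma[idx+len(clause):]
--             reduction_part = reduction_part[reduction_part.find('('):reduction_part.find(')')]
--
--             if reduction_part.count(':') == 0:
--                 return False
--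
--     return True
-- ===== SOURCE B (Python) =====
-- def omp_valid_pragma(pragma):
--     clause_vars = ['private', 'reduction', 'collapse', 'schedule', 'shared', 'default', 'aligned', 'num_threads']
--
--     # Parse the pragma into segments by splitting on '(': balanced non-nested
--     # parentheses hold iff the first segment has no ')' and every later segment
--     # has exactly one ')'.  The text preceding each '(' is then the tail of the
--     # previous segment after its ')' (or the first segment itself), so the
--     # clause-before-parenthesis rule is checked per segment, never on prefixes.
--     parts = pragma.split('(')
--     if ')' in parts[0]:
--         return False
--     chunks = [parts[0]]
--     for p in parts[1:]:
--         if p.count(')') != 1: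
--             return False
--         chunks.append(p.split(')', 1)[1])
--
--     for chunk in chunks[:-1]:
--         t = chunk.rstrip()
--         if not any(t.endswith(c) for c in clause_vars):
--             return False
--
--     for clause in ('private', 'reduction'):
--         pieces = pragma.split(clause, 1)
--         if len(pieces) == 1:
--             continue
--         after = pieces[1]
--         if not after.lstrip().startswith('('):
--             return False
--         if clause == 'reduction' and ':' not in after.split('(', 1)[1].split(')', 1)[0]:
--             return False
--     return True
-- ===== Notes on version B (the rewrite author's own statement) =====
-- stated objective: faster
-- what changed: B parses the pragma into segments with split('(') and validates the parenthesis discipline and the clause-before-parenthesis rule per segment (first segment: no ')'; later segments: exactly one ')', clause matched on the short tail after that ')'), instead of A's counter scan plus, for every '(', building and rstrip-ing a copy of the whole prefix; head checks use split(clause,1)/split('(',1)/split(')',1) instead of find+slice.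
import Mathlib
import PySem

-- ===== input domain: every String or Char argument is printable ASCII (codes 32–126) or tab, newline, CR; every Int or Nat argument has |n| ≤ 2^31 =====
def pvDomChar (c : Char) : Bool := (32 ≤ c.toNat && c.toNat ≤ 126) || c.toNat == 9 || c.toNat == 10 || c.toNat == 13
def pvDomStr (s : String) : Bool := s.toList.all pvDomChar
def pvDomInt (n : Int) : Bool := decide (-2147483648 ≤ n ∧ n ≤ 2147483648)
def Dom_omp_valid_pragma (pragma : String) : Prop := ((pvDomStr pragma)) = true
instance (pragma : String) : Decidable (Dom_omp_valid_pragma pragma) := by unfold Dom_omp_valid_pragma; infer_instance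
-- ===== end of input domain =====

-- B parses the pragma into '('-separated segments (split-based) and validates the paren discipline
-- and the clause-before-'(' rule per segment instead of A's counter scan plus per-'(' prefix copies
-- (objective: faster).

-- ===== PORT A =====
def pvClauseVars : List (List Char) :=
  ["private", "reduction", "collapse", "schedule", "shared", "default",
   "aligned", "num_threads"].map String.toList

-- for ch in pragma: check count, then update it; finally count == 0
def ompValidParenLoop : List Char → Int → Bool
  | [], count => count == 0
  | ch :: rest, count =>
      if count < 0 || count > 1 then false
      else ompValidParenLoop rest
        (if ch == '(' then count + 1 else if ch == ')' then count - 1 else count)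

def omp_valid_paren (pragma : List Char) : Bool := ompValidParenLoop pragma 0

-- for clause in clause_vars[:2]: …  (with continue / early returns)
def ompHeadLoopA (s : List Char) : List (List Char) → Bool
  | [] => true
  | c :: rest =>
      let idx := PySem.Chars.find s c
      if idx == -1 then ompHeadLoopA s rest
      else if !(PySem.Chars.startswith
          (PySem.Chars.lstrip (PySem.Chars.slice s (some (idx + (c.length : Int))) none)) ['(']) then
        false
      else if c == "reduction".toList then
        let rp := PySem.Chars.slice s (some (idx + (c.length : Int))) none
        let rp2 := PySem.Chars.slice rp (some (PySem.Chars.find rp ['('])) (some (PySem.Chars.find rp [')']))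
        if PySem.Chars.count rp2 [':'] == 0 then false else ompHeadLoopA s rest
      else ompHeadLoopA s rest

def omp_valid_pragma (pragma : String) : Bool :=
  let s := pragma.toList
  if !omp_valid_paren s then false
  else
    let paren_indexes :=
      (PySem.List.enumerate s 0).filterMap (fun p => if p.2 == '(' then some p.1 else none)
    if paren_indexes.any (fun idx =>
        pvClauseVars.all (fun c =>
          !(PySem.Chars.endswith (PySem.Chars.rstrip (PySem.Chars.slice s none (some idx))) c))) then
      false
    else ompHeadLoopA s (pvClauseVars.take 2)

-- ===== PORT B =====
-- loop over parts[1:]: each must contain exactly one ')'; collect the text after it (none = early False)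
def collectChunks : List (List Char) → Option (List (List Char))
  | [] => some []
  | p :: rest =>
      if PySem.Chars.count p [')'] != 1 then none
      else
        match collectChunks rest with
        | none => none
        | some cs => some (((PySem.Chars.splitOnMax p [')'] 1).getD 1 []) :: cs)
        -- p.split(')', 1)[1]: the index-1 access is guarded in Source B by the count check

def chunksOkB (chunks : List (List Char)) : Bool :=
  chunks.dropLast.all (fun chunk =>
    let t := PySem.Chars.rstrip chunk
    pvClauseVars.any (fun c => PySem.Chars.endswith t c))

-- for clause in ('private', 'reduction') with continue / early returns
def headLoopB (s : List Char) : List (List Char) → Bool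
  | [] => true
  | clause :: rest =>
      let pieces := PySem.Chars.splitOnMax s clause 1
      if pieces.length == 1 then headLoopB s rest
      else
        let after := pieces.getD 1 []
        if !(PySem.Chars.startswith (PySem.Chars.lstrip after) ['(']) then false
        else if clause == "reduction".toList &&
            !(PySem.Chars.isIn [':']
              ((PySem.Chars.splitOnMax ((PySem.Chars.splitOnMax after ['('] 1).getD 1 []) [')'] 1).getD 0 []))
        then false
        -- after.split('(', 1)[1]: guarded by the startswith check; split(')', 1)[0] always exists
        else headLoopB s rest

def omp_valid_pragma_alt (pragma : String) : Bool :=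
  let s := pragma.toList
  let parts := PySem.Chars.splitOn s ['(']
  let p0 := parts.headD []       -- parts[0]: split always returns a non-empty list
  if PySem.Chars.isIn [')'] p0 then false
  else
    match collectChunks parts.tail with
    | none => false
    | some cs =>
        if !(chunksOkB (p0 :: cs)) then false
        else headLoopB s ["private".toList, "reduction".toList]

-- ===== PRECONDITION & SPEC =====
def Spec_omp_valid_pragma (pragma : String) (out : Bool) : Prop := out = omp_valid_pragma_alt pragma
instance (pragma : String) (out : Bool) : Decidable (Spec_omp_valid_pragma pragma out) := by unfold Spec_omp_valid_pragma; infer_instance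

-- ===== CLAIM (what is proved, stated in full; the proofs are below) =====
def Claim_equal_omp_valid_pragma : Prop := ∀ (pragma : String), Dom_omp_valid_pragma pragma → Spec_omp_valid_pragma pragma (omp_valid_pragma pragma)

-- ===== LEMMAS AND PROOFS =====

-- structural model of s.split('(')
def smAll (c : Char) : List Char → List (List Char)
  | [] => [[]]
  | x :: xs => if x = c then [] :: smAll c xs else List.modifyHead (x :: ·) (smAll c xs)

-- structural model of s.split(sep, 1)
def sm1 (sep : List Char) : List Char → List Char × Option (List Char)
  | [] => ([], none)
  | x :: xs =>
      if sep.isPrefixOf (x :: xs) then ([], some (List.drop sep.length (x :: xs)))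
      else
        let r := sm1 sep xs
        (x :: r.1, r.2)

def anyClauseOf (pre : List Char) : Bool :=
  pvClauseVars.any (fun c => PySem.Chars.endswith (PySem.Chars.rstrip pre) c)

-- A's per-'(' check as a structural walk carrying the prefix
def openP (pre : List Char) : List Char → Bool
  | [] => true
  | x :: rest => (if x = '(' then anyClauseOf pre else true) && openP (pre ++ [x]) rest

def openA (s : List Char) : List Char → Nat → Bool
  | [], _ => true
  | x :: rest, i => (if x = '(' then anyClauseOf (s.take i) else true) && openA s rest (i + 1)

lemma go0_eq (sep : List Char) (fuel : Nat) (l cur : List Char) (acc : List (List Char)) :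
    PySem.Chars.splitOnMax.go sep fuel 0 l cur acc = ((cur.reverse ++ l) :: acc).reverse := by
  cases fuel with
  | zero => rw [PySem.Chars.splitOnMax.go]
  | succ f => cases l with
    | nil => rw [PySem.Chars.splitOnMax.go]; simp; omega
    | cons c r => rw [PySem.Chars.splitOnMax.go]; simp

lemma goMax1_eq (sep : List Char) : ∀ (fuel : Nat) (l cur : List Char) (acc : List (List Char)),
    l.length ≤ fuel →
    PySem.Chars.splitOnMax.go sep fuel 1 l cur acc =
      match sm1 sep l with
      | (a, none) => acc.reverse ++ [cur.reverse ++ a]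
      | (a, some r) => acc.reverse ++ [cur.reverse ++ a, r] := by
  intro fuel
  induction fuel with
  | zero =>
      intro l cur acc h
      have : l = [] := List.eq_nil_of_length_eq_zero (by omega)
      subst this
      rw [PySem.Chars.splitOnMax.go]
      simp [sm1]
  | succ f ih =>
      intro l cur acc h
      cases l with
      | nil => rw [PySem.Chars.splitOnMax.go]; simp [sm1]; omega
      | cons c r =>
          rw [PySem.Chars.splitOnMax.go]
          rw [if_neg (by omega)]
          by_cases hp : sep.isPrefixOf (c :: r) = true
          · rw [if_pos hp, show (1 : Nat) - 1 = 0 from rfl, go0_eq]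
            rw [sm1, if_pos hp]
            simp
          · rw [if_neg hp, ih r (c :: cur) acc (by simp at h; omega)]
            rw [sm1, if_neg hp]
            cases hr : sm1 sep r with
            | mk a b => cases b <;> simp [hr]

lemma splitOnMax1_eq (s sep : List Char) :
    PySem.Chars.splitOnMax s sep 1 =
      match sm1 sep s with
      | (a, none) => [a]
      | (a, some r) => [a, r] := by
  rw [PySem.Chars.splitOnMax, if_neg (by omega), show Int.toNat 1 = 1 from rfl,
    goMax1_eq sep (s.length + 1) s [] [] (by omega)]
  cases h : sm1 sep s with
  | mk a b => cases b <;> simp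

lemma smAll_ne_nil (c : Char) (l : List Char) : smAll c l ≠ [] := by
  cases l with
  | nil => simp [smAll]
  | cons x xs =>
      rw [smAll]
      split
      · simp
      · cases h : smAll c xs with
        | nil => exact absurd h (smAll_ne_nil c xs)
        | cons a b => simp [List.modifyHead]

lemma goAll_eq (c : Char) : ∀ (fuel : Nat) (l cur : List Char) (acc : List (List Char)),
    l.length ≤ fuel →
    PySem.Chars.splitOn.go [c] fuel l cur acc =
      acc.reverse ++ List.modifyHead (cur.reverse ++ ·) (smAll c l) := by
  intro fuel
  induction fuel with
  | zero =>
      intro l cur acc h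
      have : l = [] := List.eq_nil_of_length_eq_zero (by omega)
      subst this
      rw [PySem.Chars.splitOn.go]
      simp [smAll]
  | succ f ih =>
      intro l cur acc h
      cases l with
      | nil => rw [PySem.Chars.splitOn.go]; simp [smAll]; omega
      | cons x r =>
          rw [PySem.Chars.splitOn.go]
          by_cases hp : [c].isPrefixOf (x :: r) = true
          · have hcx : x = c := by
              simp [List.isPrefixOf] at hp
              exact hp.symm
            rw [if_pos hp]
            subst hcx
            show PySem.Chars.splitOn.go [x] f (List.drop ([] : List Char).length r) [] (cur.reverse :: acc) = _
            simp only [List.length_nil, List.drop_zero]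
            rw [ih r [] (cur.reverse :: acc) (by simp at h; omega)]
            rw [smAll, if_pos rfl]
            cases hs : smAll x r with
            | nil => exact absurd hs (smAll_ne_nil x r)
            | cons a b => simp
          · have hcx : ¬ x = c := by
              simp [List.isPrefixOf] at hp
              exact fun hh => hp hh.symm
            rw [if_neg hp, ih r (x :: cur) acc (by simp at h; omega)]
            rw [smAll, if_neg hcx]
            cases hs : smAll c r with
            | nil => exact absurd hs (smAll_ne_nil c r)
            | cons a b => simp

lemma splitOn_eq (s : List Char) (c : Char) :
    PySem.Chars.splitOn s [c] = smAll c s := by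
  rw [PySem.Chars.splitOn, goAll_eq c (s.length + 1) s [] [] (by omega)]
  cases hs : smAll c s with
  | nil => exact absurd hs (smAll_ne_nil c s)
  | cons a b => simp

lemma smAll_join (c : Char) (s : List Char) :
    s = (smAll c s).headD [] ++ (((smAll c s).tail.map (c :: ·)).flatten) := by
  induction s with
  | nil => simp [smAll]
  | cons x xs ih =>
      rw [smAll]
      by_cases hx : x = c
      · rw [if_pos hx]
        subst hx
        cases hs : smAll x xs with
        | nil => exact absurd hs (smAll_ne_nil x xs)
        | cons a b =>
            rw [hs] at ih
            simp at ih ⊢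
            exact ih
      · rw [if_neg hx]
        cases hs : smAll c xs with
        | nil => exact absurd hs (smAll_ne_nil c xs)
        | cons a b =>
            rw [hs] at ih
            simp at ih ⊢
            exact ih

lemma smAll_no_sep (c : Char) (l : List Char) : ∀ p ∈ smAll c l, c ∉ p := by
  induction l with
  | nil => simp [smAll]
  | cons x xs ih =>
      rw [smAll]
      by_cases hx : x = c
      · rw [if_pos hx]
        intro p hp
        rcases List.mem_cons.mp hp with h | h
        · subst h; simp
        · exact ih p h
      · rw [if_neg hx]
        cases hs : smAll c xs with
        | nil => exact absurd hs (smAll_ne_nil c xs)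
        | cons a b =>
            rw [hs] at ih
            intro p hp
            simp [List.modifyHead] at hp
            rcases hp with h | h
            · subst h
              simp
              constructor
              · exact fun hh => hx hh.symm
              · exact ih a (by simp)
            · exact ih p (by simp [h])
lemma find_eq_of (s sub : List Char) (m : Nat) (hsub : sub ≠ [])
    (h1 : sub <+: s.drop m) (h2 : ∀ i < m, ¬ sub <+: s.drop i) :
    PySem.Chars.find s sub = (m : Int) := by
  have hinf : sub <:+: s := by
    rcases h1 with ⟨t, ht⟩
    exact ⟨s.take m, t, by rw [List.append_assoc, ht, List.take_append_drop]⟩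
  have hnn : 0 ≤ PySem.Chars.find s sub := (PySem.Chars.find_nonneg_iff s sub).mpr hinf
  obtain ⟨hp, hmin⟩ := PySem.Chars.find_spec hnn
  have : (PySem.Chars.find s sub).toNat = m := by
    rcases lt_trichotomy (PySem.Chars.find s sub).toNat m with h | h | h
    · exact absurd hp (h2 _ h)
    · exact h
    · exact absurd h1 (hmin m h)
  omega

lemma sm1_eq (sep : List Char) (hsep : sep ≠ []) : ∀ (l : List Char),
    sm1 sep l =
      if PySem.Chars.find l sep = -1 then (l, none)
      else (l.take (PySem.Chars.find l sep).toNat,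
            some (l.drop ((PySem.Chars.find l sep).toNat + sep.length))) := by
  intro l
  induction l with
  | nil =>
      have : PySem.Chars.find [] sep = -1 := by
        rw [PySem.Chars.find_eq_neg_one_iff]
        rw [List.infix_nil]
        exact hsep
      simp [sm1, this]
  | cons x xs ih =>
      rw [sm1]
      by_cases hp : sep.isPrefixOf (x :: xs) = true
      · have hpre : sep <+: (x :: xs) := List.isPrefixOf_iff_prefix.mp hp
        have hf : PySem.Chars.find (x :: xs) sep = ((0 : Nat) : Int) := by
          apply find_eq_of _ _ 0 hsep
          · simpa using hpre
          · intro i hi; omega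
        rw [if_pos hp, hf]
        norm_num
      · have hnp : ¬ sep <+: (x :: xs) := fun hc => hp (List.isPrefixOf_iff_prefix.mpr hc)
        rw [if_neg hp, ih]
        by_cases hfx : PySem.Chars.find xs sep = -1
        · have : PySem.Chars.find (x :: xs) sep = -1 := by
            rw [PySem.Chars.find_eq_neg_one_iff] at hfx ⊢
            intro hc
            rcases List.infix_cons_iff.mp hc with h | h
            · exact hnp h
            · exact hfx h
          simp [hfx, this]
        · have hnn : 0 ≤ PySem.Chars.find xs sep := by
            have := PySem.Chars.neg_one_le_find (s := xs) (sub := sep)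
            omega
          set m := (PySem.Chars.find xs sep).toNat with hm
          obtain ⟨hp1, hmin⟩ := PySem.Chars.find_spec hnn
          have hf : PySem.Chars.find (x :: xs) sep = ((m + 1 : Nat) : Int) := by
            apply find_eq_of _ _ (m + 1) hsep
            · simpa using hp1
            · intro i hi
              cases i with
              | zero => simpa using hnp
              | succ j => exact hmin j (by omega)
          rw [if_neg hfx, hf, if_neg (by omega)]
          simp only [Int.toNat_natCast]
          rw [List.take_succ_cons, show m + 1 + sep.length = (m + sep.length) + 1 from by omega,
            List.drop_succ_cons]

lemma singleton_prefix_iff (t : List Char) (a : Char) : [a] <+: t ↔ t[0]? = some a := by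
  cases t with
  | nil => simp
  | cons x xs =>
      constructor
      · intro h
        rcases h with ⟨u, hu⟩
        simp at hu
        simp [hu.1]
      · intro h
        simp at h
        exact ⟨xs, by simp [h]⟩

lemma find_single_spec (t : List Char) (a : Char) (h : 0 ≤ PySem.Chars.find t [a]) :
    t[(PySem.Chars.find t [a]).toNat]? = some a ∧
      ∀ r < (PySem.Chars.find t [a]).toNat, t[r]? ≠ some a := by
  obtain ⟨hpre, hmin⟩ := PySem.Chars.find_spec h
  constructor
  · rw [singleton_prefix_iff] at hpre
    rwa [List.getElem?_drop, Nat.add_zero] at hpre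
  · intro r hr hcontra
    apply hmin r hr
    rw [singleton_prefix_iff, List.getElem?_drop, Nat.add_zero]
    exact hcontra

lemma find_single_eq (t : List Char) (a : Char) (m : Nat)
    (hm : t[m]? = some a) (hless : ∀ r < m, t[r]? ≠ some a) :
    PySem.Chars.find t [a] = (m : Int) := by
  apply find_eq_of t [a] m (by simp)
  · rw [singleton_prefix_iff, List.getElem?_drop, Nat.add_zero]
    exact hm
  · intro i hi
    rw [singleton_prefix_iff, List.getElem?_drop, Nat.add_zero]
    exact hless i hi

lemma count_go_single (a : Char) (t : List Char) :
    ∀ (fuel acc : Nat), t.length ≤ fuel → PySem.Chars.count.go [a] fuel t acc = acc + t.count a := by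
  induction t with
  | nil => intro fuel acc h; cases fuel <;> simp [PySem.Chars.count.go]
  | cons x xs ih =>
      intro fuel acc h
      cases fuel with
      | zero => simp at h
      | succ f =>
          rw [PySem.Chars.count.go]
          by_cases hx : x = a
          · subst hx
            rw [if_pos (by simp)]
            simp only [List.length_cons, List.drop_succ_cons, List.length_nil, List.drop_zero]
            rw [ih f (acc + 1) (by simp at h; omega)]
            simp
            omega
          · rw [if_neg (by simp [List.isPrefixOf]; exact fun hh => hx hh.symm)]
            rw [ih f acc (by simp at h; omega)]
            simp [hx]

lemma count_single_eq (t : List Char) (a : Char) :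
    PySem.Chars.count t [a] = t.count a := by
  rw [PySem.Chars.count]
  rw [if_neg (by simp)]
  simpa using count_go_single a t t.length 0 le_rfl

lemma isIn_single_iff (t : List Char) (a : Char) :
    PySem.Chars.isIn [a] t = true ↔ a ∈ t := by
  rw [PySem.Chars.isIn_iff_infix, List.singleton_infix_iff]

lemma count_ne_isIn (X : List Char) (a : Char) :
    (!(PySem.Chars.count X [a] == 0)) = PySem.Chars.isIn [a] X := by
  rw [count_single_eq, Bool.eq_iff_iff]
  simp only [Bool.not_eq_true', beq_eq_false_iff_ne, Ne]
  rw [isIn_single_iff]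
  constructor
  · intro h
    exact List.count_pos_iff.mp (Nat.pos_of_ne_zero h)
  · intro h
    exact Nat.pos_iff_ne_zero.mp (List.count_pos_iff.mpr h)

lemma parenLoop_out (rest : List Char) (c : Int) (h : c < 0 ∨ 1 < c) :
    ompValidParenLoop rest c = false := by
  cases rest with
  | nil => simp [ompValidParenLoop]; omega
  | cons ch r =>
      have : (decide (c < 0) || decide (c > 1)) = true := by
        rcases h with h | h <;> simp [h]
      simp [ompValidParenLoop, this]

lemma paren_seg (s : List Char) :
    (ompValidParenLoop s 0 =
      ((((smAll '(' s).headD []).count ')' == 0) &&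
        ((smAll '(' s).tail).all (fun p => p.count ')' == 1)))
    ∧ (ompValidParenLoop s 1 = (smAll '(' s).all (fun p => p.count ')' == 1)) := by
  induction s with
  | nil => simp [ompValidParenLoop, smAll]
  | cons x xs ih =>
      obtain ⟨ih0, ih1⟩ := ih
      by_cases hx : x = '('
      · subst hx
        have e0 : ompValidParenLoop ('(' :: xs) 0 = ompValidParenLoop xs 1 := by
          simp [ompValidParenLoop]
        have e1 : ompValidParenLoop ('(' :: xs) 1 = ompValidParenLoop xs 2 := by
          simp [ompValidParenLoop]
        rw [smAll, if_pos rfl]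
        refine ⟨?_, ?_⟩
        · rw [e0, ih1]; simp
        · rw [e1, parenLoop_out xs 2 (by omega)]
          cases hs : smAll '(' xs with
          | nil => exact absurd hs (smAll_ne_nil _ xs)
          | cons a b => simp
      · rw [smAll, if_neg hx]
        cases hs : smAll '(' xs with
        | nil => exact absurd hs (smAll_ne_nil _ xs)
        | cons a b =>
            rw [hs] at ih0 ih1
            by_cases hy : x = ')'
            · subst hy
              have e0 : ompValidParenLoop (')' :: xs) 0 = ompValidParenLoop xs (-1) := by
                simp [ompValidParenLoop]
              have e1 : ompValidParenLoop (')' :: xs) 1 = ompValidParenLoop xs 0 := by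
                simp [ompValidParenLoop]
              refine ⟨?_, ?_⟩
              · rw [e0, parenLoop_out xs (-1) (by omega)]
                simp [List.modifyHead]
              · rw [e1, ih0]
                simp [List.modifyHead]
            · have e0 : ompValidParenLoop (x :: xs) 0 = ompValidParenLoop xs 0 := by
                simp [ompValidParenLoop, hx, hy]
              have e1 : ompValidParenLoop (x :: xs) 1 = ompValidParenLoop xs 1 := by
                simp [ompValidParenLoop, hx, hy]
              refine ⟨?_, ?_⟩
              · rw [e0, ih0]
                simp [List.modifyHead, List.count_cons, hy]
              · rw [e1, ih1]
                simp [List.modifyHead, List.count_cons, hy]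
lemma rstrip_append_cons (u v : List Char) (b : Char) (hb : PySem.Chars.isspace b = false) :
    PySem.Chars.rstrip (u ++ b :: v) = u ++ b :: PySem.Chars.rstrip v := by
  unfold PySem.Chars.rstrip
  rw [show (u ++ b :: v).reverse = v.reverse ++ (b :: u.reverse) from by simp]
  rw [List.dropWhile_append]
  by_cases h : (v.reverse.dropWhile PySem.Chars.isspace).isEmpty = true
  · rw [if_pos h]
    rw [List.dropWhile_cons_of_neg (by simp [hb])]
    rw [List.isEmpty_iff] at h
    rw [h]
    simp
  · rw [if_neg h]
    simp

lemma suffix_of_suffix_le (l1 l2 t : List Char) (h1 : l1 <:+ t) (h2 : l2 <:+ t)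
    (hle : l1.length ≤ l2.length) : l1 <:+ l2 := by
  rcases h1 with ⟨w1, hw1⟩
  rcases h2 with ⟨w2, hw2⟩
  have hlen : w2.length ≤ w1.length := by
    have e1 : w1.length + l1.length = t.length := by rw [← hw1]; simp
    have e2 : w2.length + l2.length = t.length := by rw [← hw2]; simp
    omega
  have hw2take : w2 = w1.take w2.length := by
    have : (w2 ++ l2).take w2.length = (w1 ++ l1).take w2.length := by rw [hw1, hw2]
    rwa [List.take_left, List.take_append_of_le_length hlen] at this
  refine ⟨w1.drop w2.length, ?_⟩
  have hsplit : w1 = w2 ++ w1.drop w2.length := by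
    conv_lhs => rw [← List.take_append_drop w2.length w1, ← hw2take]
  have : w2 ++ l2 = w2 ++ (w1.drop w2.length ++ l1) := by
    rw [hw2, ← hw1]
    conv_rhs => rw [← List.append_assoc, ← hsplit]
  exact (List.append_cancel_left this).symm

lemma endswith_append_cons (u v clause : List Char) (b : Char) (hb : b ∉ clause) :
    PySem.Chars.endswith (u ++ b :: v) clause = PySem.Chars.endswith v clause := by
  rw [Bool.eq_iff_iff, PySem.Chars.endswith_iff, PySem.Chars.endswith_iff]
  have hv : v <:+ u ++ b :: v := (List.suffix_cons b v).trans (List.suffix_append u (b :: v))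
  by_cases hle : clause.length ≤ v.length
  · constructor
    · intro h
      exact suffix_of_suffix_le clause v (u ++ b :: v) h hv hle
    · intro h
      exact h.trans hv
  · constructor
    · intro h
      exfalso
      have hbv : (b :: v) <:+ (u ++ b :: v) := List.suffix_append u (b :: v)
      have : (b :: v) <:+ clause :=
        suffix_of_suffix_le (b :: v) clause (u ++ b :: v) hbv h (by simp; omega)
      exact hb (this.subset (by simp))
    · intro h
      exact absurd h.length_le (by omega)
lemma clause_no_paren : ∀ c ∈ pvClauseVars, ')' ∉ c ∧ '(' ∉ c := by decide

lemma anyClauseOf_chunk (u p : List Char) (hp : 1 ≤ p.count ')') :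
    anyClauseOf (u ++ p) = anyClauseOf (p.drop ((PySem.Chars.find p [')']).toNat + 1)) := by
  have hmem : ')' ∈ p := List.count_pos_iff.mp (by omega)
  have hnn : 0 ≤ PySem.Chars.find p [')'] := by
    apply (PySem.Chars.find_nonneg_iff p [')']).mpr
    rw [List.singleton_infix_iff]
    exact hmem
  set m := (PySem.Chars.find p [')']).toNat with hm
  obtain ⟨hget, _⟩ := find_single_spec p ')' hnn
  rw [← hm] at hget
  have hmlt : m < p.length := (List.getElem?_eq_some_iff.mp hget).1
  have hdecomp : p = p.take m ++ ')' :: p.drop (m + 1) := by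
    conv_lhs => rw [← List.take_append_drop m p]
    congr 1
    rw [List.drop_eq_getElem_cons hmlt]
    congr 1
    rw [List.getElem?_eq_getElem hmlt] at hget
    simpa using hget
  conv_lhs => rw [hdecomp]
  unfold anyClauseOf
  have key : ∀ c ∈ pvClauseVars,
      PySem.Chars.endswith (PySem.Chars.rstrip (u ++ (p.take m ++ ')' :: p.drop (m + 1)))) c
        = PySem.Chars.endswith (PySem.Chars.rstrip (p.drop (m + 1))) c := by
    intro c hc
    rw [show u ++ (p.take m ++ ')' :: p.drop (m + 1)) = (u ++ p.take m) ++ ')' :: p.drop (m + 1)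
      from by simp]
    rw [rstrip_append_cons _ _ _ (by decide)]
    rw [endswith_append_cons _ _ _ _ (clause_no_paren c hc).1]
  rw [Bool.eq_iff_iff]
  simp only [List.any_eq_true]
  constructor
  · rintro ⟨c, hc, h⟩
    exact ⟨c, hc, by rw [← key c hc]; exact h⟩
  · rintro ⟨c, hc, h⟩
    exact ⟨c, hc, by rw [key c hc]; exact h⟩
lemma all_not_any (l : List (List Char)) (f : List Char → Bool) :
    l.all (fun c => !f c) = !(l.any f) := by
  induction l with
  | nil => simp
  | cons x xs ih => simp [ih]

lemma anyFail_eq (s : List Char) :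
    ∀ (rest : List Char) (i : Nat), i + rest.length ≤ s.length →
    ((PySem.List.enumerate rest (i : Int)).filterMap
        (fun p => if p.2 == '(' then some p.1 else none)).any (fun idx =>
          pvClauseVars.all (fun c =>
            !(PySem.Chars.endswith (PySem.Chars.rstrip (PySem.Chars.slice s none (some idx))) c)))
      = !(openA s rest i) := by
  intro rest
  induction rest with
  | nil => intro i _; simp [PySem.List.enumerate, openA]
  | cons ch r ih =>
      intro i hlen
      rw [PySem.List.enumerate_cons]
      have hcast : (i : Int) + 1 = ((i + 1 : Nat) : Int) := by omega
      rw [hcast]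
      have hr := ih (i + 1) (by simp at hlen ⊢; omega)
      by_cases h : ch = '('
      · subst h
        have hf : (fun p : Int × Char => if (p.2 == '(') = true then some p.1 else none)
            ((i : Int), '(') = some (i : Int) := by simp
        simp only [List.filterMap_cons, hf, List.any_cons]
        rw [hr]
        have hslice : PySem.Chars.slice s none (some (i : Int)) = s.take i := by
          simp [PySem.Chars.slice_eq_listSlice, PySem.List.slice_to_natCast]
        rw [hslice, all_not_any]
        have hstep : openA s ('(' :: r) i = (anyClauseOf (s.take i) && openA s r (i + 1)) := by
          rfl
        rw [hstep]
        cases h1 : anyClauseOf (s.take i) <;> cases openA s r (i + 1) <;>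
          simp_all [anyClauseOf]
      · have hf : (fun p : Int × Char => if (p.2 == '(') = true then some p.1 else none)
            ((i : Int), ch) = none := by simp [h]
        simp only [List.filterMap_cons, hf]
        rw [hr]
        have hstep : openA s (ch :: r) i = openA s r (i + 1) := by
          show ((if ch = '(' then anyClauseOf (s.take i) else true) && openA s r (i + 1)) = _
          rw [if_neg h, Bool.true_and]
        rw [hstep]

lemma openA_eq_openP (s : List Char) :
    ∀ (rest : List Char) (i : Nat), rest = s.drop i → i ≤ s.length →
    openA s rest i = openP (s.take i) rest := by
  intro rest
  induction rest with
  | nil => intro i _ _; simp [openA, openP]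
  | cons x r ih =>
      intro i hdrop hle
      have hlt : i < s.length := by
        by_contra hc
        rw [List.drop_eq_nil_of_le (by omega)] at hdrop
        simp at hdrop
      have hx : s[i] = x := by
        have h2 := List.drop_eq_getElem_cons hlt
        rw [← hdrop] at h2
        exact (List.cons_eq_cons.mp h2).1.symm
      have htake : s.take (i + 1) = s.take i ++ [x] := by
        rw [List.take_succ, List.getElem?_eq_getElem hlt, hx]
        rfl
      rw [openA, openP]
      rw [ih (i + 1) (by rw [← List.drop_drop]; rw [← hdrop]; simp) (by omega), htake]

lemma openP_append_noParen (q : List Char) (hq : '(' ∉ q) :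
    ∀ pre rest, openP pre (q ++ rest) = openP (pre ++ q) rest := by
  induction q with
  | nil => intro pre rest; simp
  | cons x xs ih =>
      intro pre rest
      have hx : x ≠ '(' := fun h => hq (h ▸ List.mem_cons_self)
      rw [List.cons_append, openP, if_neg hx]
      simp only [Bool.true_and]
      rw [ih (fun h => hq (List.mem_cons_of_mem _ h)) (pre ++ [x]) rest]
      simp

lemma tail_full (ps : List (List Char)) :
    (∀ p ∈ ps, '(' ∉ p ∧ 1 ≤ p.count ')') →
    ∀ pre, openP pre ((ps.map ('(' :: ·)).flatten) =
      ((pre :: ps.map (fun p => p.drop ((PySem.Chars.find p [')']).toNat + 1))).dropLast).all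
        anyClauseOf := by
  induction ps with
  | nil => intro h pre; simp [openP]
  | cons p ps' ih =>
      intro h pre
      have hp := h p (by simp)
      rw [List.map_cons, List.flatten_cons]
      rw [show ('(' :: p) ++ (ps'.map ('(' :: ·)).flatten
            = '(' :: (p ++ (ps'.map ('(' :: ·)).flatten) from rfl]
      rw [openP, if_pos rfl]
      rw [openP_append_noParen p hp.1 (pre ++ ['(']) _]
      rw [ih (fun q hq => h q (by simp [hq])) (pre ++ ['('] ++ p)]
      cases ps' with
      | nil => simp
      | cons q qs =>
          simp only [List.map_cons]
          rw [show ∀ (a b : List Char) (l : List (List Char)), (a :: b :: l).dropLast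
              = a :: (b :: l).dropLast from fun _ _ _ => rfl]
          rw [show ∀ (a b : List Char) (l : List (List Char)), (a :: b :: l).dropLast
              = a :: (b :: l).dropLast from fun _ _ _ => rfl]
          simp only [List.all_cons]
          rw [anyClauseOf_chunk (pre ++ ['(']) p hp.2]
          simp [Bool.and_assoc]
lemma loop_one_mem (l : List Char) (h : ompValidParenLoop l 1 = true) : ')' ∈ l := by
  induction l with
  | nil => simp [ompValidParenLoop] at h
  | cons x xs ih =>
      by_cases hx : x = ')'
      · simp [hx]
      · right
        apply ih
        rw [ompValidParenLoop, if_neg (by norm_num)] at h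
        by_cases ho : x = '('
        · rw [if_pos (by simp [ho])] at h
          rw [parenLoop_out xs (1+1) (by omega)] at h
          exact absurd h (by simp)
        · rwa [if_neg (by simp [ho]), if_neg (by simp [hx])] at h

lemma loop_open_close (l : List Char) : ∀ (c : Int), ompValidParenLoop l c = true →
    '(' ∈ l → ')' ∈ l := by
  induction l with
  | nil => intro c h hm; simp at hm
  | cons x xs ih =>
      intro c h hm
      rw [ompValidParenLoop] at h
      by_cases hguard : (decide (c < 0) || decide (c > 1)) = true
      · rw [if_pos hguard] at h; exact absurd h (by simp)
      · rw [if_neg hguard] at h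
        simp only [Bool.or_eq_true, decide_eq_true_eq] at hguard
        push_neg at hguard
        by_cases hx : x = ')'
        · simp [hx]
        · right
          by_cases ho : x = '('
          · rw [if_pos (by simp [ho])] at h
            have hc1 : c = 0 := by
              by_contra hc
              have : c = 1 := by omega
              rw [this] at h
              rw [parenLoop_out xs (1+1) (by omega)] at h
              exact absurd h (by simp)
            rw [hc1] at h
            norm_num at h
            exact loop_one_mem xs h
          · rw [if_neg (by simp [ho]), if_neg (by simp [hx])] at h
            apply ih c h
            rcases List.mem_cons.mp hm with he | he
            · exact absurd he.symm ho
            · exact he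

lemma loop_suffix (s : List Char) (h : ompValidParenLoop s 0 = true) :
    ∀ (b : Nat), ∃ c, (ompValidParenLoop (s.drop b) c = true ∧ 0 ≤ c ∧ c ≤ 1) := by
  intro b
  induction b with
  | zero => exact ⟨0, by simpa using h, by omega, by omega⟩
  | succ n ih =>
      obtain ⟨c, hc, hc0, hc1⟩ := ih
      cases hd : s.drop n with
      | nil =>
          refine ⟨0, ?_, by omega, by omega⟩
          rw [show s.drop (n + 1) = (s.drop n).drop 1 from by rw [List.drop_drop]]
          rw [hd]
          simp [ompValidParenLoop]
      | cons x r =>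
          have hr : s.drop (n + 1) = r := by
            rw [show s.drop (n + 1) = (s.drop n).drop 1 from by rw [List.drop_drop], hd]
            simp
          rw [hd] at hc
          rw [ompValidParenLoop, if_neg (by simp; omega)] at hc
          refine ⟨_, hr ▸ hc, ?_, ?_⟩
          · by_contra hneg
            push_neg at hneg
            rw [parenLoop_out r _ (by omega)] at hc
            exact absurd hc (by simp)
          · by_contra hneg
            push_neg at hneg
            rw [parenLoop_out r _ (by omega)] at hc
            exact absurd hc (by simp)
lemma reduction_inner_eq (s : List Char) (hP : ompValidParenLoop s 0 = true)
    (b : Nat) (rp : List Char) (hrp : rp = s.drop b)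
    (hsw : PySem.Chars.startswith (PySem.Chars.lstrip rp) ['('] = true) :
    (PySem.Chars.count
        (PySem.Chars.slice rp (some (PySem.Chars.find rp ['('])) (some (PySem.Chars.find rp [')'])))
        [':'] == 0)
      = !(PySem.Chars.isIn [':']
          ((PySem.Chars.splitOnMax ((PySem.Chars.splitOnMax rp ['('] 1).getD 1 []) [')'] 1).getD 0 [])) := by
  -- k = number of leading spaces; rp[k] = '('
  set k := (rp.takeWhile PySem.Chars.isspace).length with hk
  have hklen : k ≤ rp.length := by
    rw [hk]
    exact (List.takeWhile_prefix _).length_le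
  have hdw : rp.dropWhile PySem.Chars.isspace = rp.drop k := by
    conv_rhs => rw [← List.takeWhile_append_dropWhile (p := PySem.Chars.isspace) (l := rp)]
    rw [hk, List.drop_left]
  have hsp : ∀ j < k, ∀ ch : Char, rp[j]? = some ch → PySem.Chars.isspace ch = true := by
    intro j hj ch hch
    have e : rp[j]? = (rp.takeWhile PySem.Chars.isspace)[j]? := by
      conv_lhs => rw [← List.takeWhile_append_dropWhile (p := PySem.Chars.isspace) (l := rp)]
      rw [List.getElem?_append_left (by omega)]
    rw [e] at hch
    exact List.mem_takeWhile_imp (List.mem_of_getElem? hch)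
  have hopen : rp[k]? = some '(' := by
    rw [PySem.Chars.startswith_iff, singleton_prefix_iff] at hsw
    rw [PySem.Chars.lstrip, hdw] at hsw
    rwa [List.getElem?_drop, Nat.add_zero] at hsw
  have hklt : k < rp.length := (List.getElem?_eq_some_iff.mp hopen).1
  have hfo : PySem.Chars.find rp ['('] = (k : Int) := by
    apply find_single_eq rp '(' k hopen
    intro r hr
    intro hc
    have h2 := hsp r hr '(' hc
    exact absurd h2 (by decide)
  -- ')' exists in rp
  have hmem : ')' ∈ rp := by
    obtain ⟨c, hc, _, _⟩ := loop_suffix s hP b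
    rw [← hrp] at hc
    apply loop_open_close rp c hc
    have := List.getElem?_eq_some_iff.mp hopen
    exact List.mem_of_getElem? hopen
  have hqnn : 0 ≤ PySem.Chars.find rp [')'] := by
    apply (PySem.Chars.find_nonneg_iff rp [')']).mpr
    rw [List.singleton_infix_iff]
    exact hmem
  set q := (PySem.Chars.find rp [')']).toNat with hq
  obtain ⟨hqget, hqmin⟩ := find_single_spec rp ')' hqnn
  rw [← hq] at hqget hqmin
  have hqlt : q < rp.length := (List.getElem?_eq_some_iff.mp hqget).1
  have hkq : k < q := by
    rcases lt_trichotomy q k with h | h | h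
    · have h2 := hsp q h ')' hqget
      exact absurd h2 (by decide)
    · rw [h] at hqget
      rw [hopen] at hqget
      simp at hqget
    · exact h
  have hfq : PySem.Chars.find rp [')'] = (q : Int) := by omega
  -- A's slice
  have hA : PySem.Chars.slice rp (some (PySem.Chars.find rp ['(']))
      (some (PySem.Chars.find rp [')'])) = (rp.drop k).take (q - k) := by
    rw [hfo, hfq, PySem.Chars.slice_eq_listSlice, PySem.List.slice_natCast]
  have hdropk : rp.drop k = '(' :: rp.drop (k + 1) := by
    rw [List.drop_eq_getElem_cons hklt]
    congr 1
    rw [List.getElem?_eq_getElem hklt] at hopen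
    simpa using hopen
  set X := (rp.drop (k + 1)).take (q - k - 1) with hX
  have hA2 : (rp.drop k).take (q - k) = '(' :: X := by
    rw [hdropk, hX]
    rw [show q - k = (q - k - 1) + 1 from by omega]
    rfl
  -- B's inner
  have hB1 : (PySem.Chars.splitOnMax rp ['('] 1).getD 1 [] = rp.drop (k + 1) := by
    rw [splitOnMax1_eq, sm1_eq ['('] (by simp) rp, hfo]
    rw [if_neg (by omega)]
    simp
  have hfq2 : PySem.Chars.find (rp.drop (k + 1)) [')'] = ((q - k - 1 : Nat) : Int) := by
    apply find_single_eq
    · rw [List.getElem?_drop, show k + 1 + (q - k - 1) = q from by omega]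
      exact hqget
    · intro r hr
      rw [List.getElem?_drop]
      exact hqmin (k + 1 + r) (by omega)
  have hB2 : (PySem.Chars.splitOnMax (rp.drop (k + 1)) [')'] 1).getD 0 [] = X := by
    rw [splitOnMax1_eq, sm1_eq [')'] (by simp) _, hfq2]
    rw [if_neg (by omega)]
    simp [hX]
  rw [hA, hA2, hB1, hB2]
  rw [show PySem.Chars.count ('(' :: X) [':'] = PySem.Chars.count X [':'] from by
    rw [count_single_eq, count_single_eq, List.count_cons]
    simp]
  have := count_ne_isIn X ':'
  cases h : PySem.Chars.count X [':'] == 0 <;> cases h2 : PySem.Chars.isIn [':'] X <;> simp_all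

-- head-check equality under a valid paren structure
lemma head_eq (s : List Char) (hP : ompValidParenLoop s 0 = true) :
    ∀ (cl : List (List Char)), (∀ c ∈ cl, c ≠ []) →
    ompHeadLoopA s cl = headLoopB s cl := by
  intro cl
  induction cl with
  | nil => intro _; rfl
  | cons c rest ih =>
      intro hne
      have hc : c ≠ [] := hne c (by simp)
      have ihr := ih (fun d hd => hne d (by simp [hd]))
      rw [ompHeadLoopA, headLoopB]
      rw [splitOnMax1_eq s c, sm1_eq c hc s]
      by_cases hidx : PySem.Chars.find s c = -1
      · rw [if_pos (by simp [hidx]), hidx]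
        rw [if_pos rfl]
        simp only [List.length_singleton]
        rw [if_pos (by simp)]
        exact ihr
      · have hnn : 0 ≤ PySem.Chars.find s c := by
          have := PySem.Chars.neg_one_le_find (s := s) (sub := c)
          omega
        rw [if_neg (by simpa using hidx), if_neg hidx]
        simp only [List.length_cons, List.length_nil]
        simp only [show ((2 : Nat) == 1) = false from rfl, Bool.false_eq_true, if_false]
        have htonat : (PySem.Chars.find s c + (c.length : Int)).toNat
            = (PySem.Chars.find s c).toNat + c.length := by omega
        have hslice : PySem.Chars.slice s (some (PySem.Chars.find s c + (c.length : Int))) none =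
            s.drop ((PySem.Chars.find s c).toNat + c.length) := by
          rw [PySem.Chars.slice_eq_listSlice, PySem.List.slice_from s (by omega), htonat]
        rw [hslice]
        have hgetD : ([s.take (PySem.Chars.find s c).toNat,
            s.drop ((PySem.Chars.find s c).toNat + c.length)].getD 1 [] : List Char)
            = s.drop ((PySem.Chars.find s c).toNat + c.length) := rfl
        rw [hgetD]
        cases hG : PySem.Chars.startswith
            (PySem.Chars.lstrip (s.drop ((PySem.Chars.find s c).toNat + c.length))) ['('] with
        | false =>
            simp only [hG, Bool.not_false, if_true]
        | true =>
            simp only [hG, Bool.not_true, Bool.false_eq_true, if_false]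
            by_cases hred : c = "reduction".toList
            · simp only [show (c == "reduction".toList) = true from by simp [hred], if_true,
                Bool.true_and]
              rw [reduction_inner_eq s hP ((PySem.Chars.find s c).toNat + c.length)
                (s.drop ((PySem.Chars.find s c).toNat + c.length)) rfl hG]
              cases hx : PySem.Chars.isIn [':']
                  ((PySem.Chars.splitOnMax
                    ((PySem.Chars.splitOnMax (s.drop ((PySem.Chars.find s c).toNat + c.length))
                      ['('] 1).getD 1 []) [')'] 1).getD 0 []) with
              | true =>
                  simp only [hx, Bool.not_true, Bool.false_eq_true, if_false]
                  exact ihr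
              | false => simp only [hx, Bool.not_false, if_true]
            · simp only [show (c == "reduction".toList) = false from by
                  rw [beq_eq_false_iff_ne]; exact hred,
                Bool.false_and, Bool.false_eq_true, if_false]
              exact ihr

-- collectChunks characterisation
lemma collectChunks_eq (ps : List (List Char)) :
    collectChunks ps =
      if ps.all (fun p => p.count ')' == 1)
      then some (ps.map (fun p => (PySem.Chars.splitOnMax p [')'] 1).getD 1 []))
      else none := by
  induction ps with
  | nil => simp [collectChunks]
  | cons p rest ih =>
      rw [collectChunks]
      rw [show PySem.Chars.count p [')'] = p.count ')' from count_single_eq p ')']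
      cases hp : (p.count ')' == 1) with
      | false =>
          rw [if_pos (by simp at hp ⊢; omega)]
          simp [hp]
      | true =>
          rw [if_neg (by simp at hp ⊢; omega), ih]
          cases hall : rest.all (fun p => p.count ')' == 1) with
          | true => simp [hall, hp]
          | false => simp [hall, hp]

-- the chunk of a segment with a ')' in it
lemma after1B_eq (p : List Char) (hp : 1 ≤ p.count ')') :
    (PySem.Chars.splitOnMax p [')'] 1).getD 1 []
      = p.drop ((PySem.Chars.find p [')']).toNat + 1) := by
  have hmem : ')' ∈ p := List.count_pos_iff.mp (by omega)
  have hne : ¬ PySem.Chars.find p [')'] = -1 := by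
    intro hfeq
    rw [PySem.Chars.find_eq_neg_one_iff, List.singleton_infix_iff] at hfeq
    exact hfeq hmem
  rw [splitOnMax1_eq, sm1_eq [')'] (by simp) p, if_neg hne]
  simp

-- ===== VERDICT (by name: the statement is the Claim_ definition above) =====
theorem omp_valid_pragma_spec : Claim_equal_omp_valid_pragma := by
  intro pragma _hDom
  unfold Spec_omp_valid_pragma
  set s := pragma.toList with hsdef
  cases hs : smAll '(' s with
  | nil => exact absurd hs (smAll_ne_nil '(' s)
  | cons p0 ps =>
  have hB : omp_valid_pragma_alt pragma =
      (if PySem.Chars.isIn [')'] p0 then false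
       else
         match collectChunks ps with
         | none => false
         | some cs =>
             if !(chunksOkB (p0 :: cs)) then false
             else headLoopB s ["private".toList, "reduction".toList]) := by
    rw [show omp_valid_pragma_alt pragma =
        (if PySem.Chars.isIn [')'] ((PySem.Chars.splitOn s ['(']).headD []) then false
         else
           match collectChunks (PySem.Chars.splitOn s ['(']).tail with
           | none => false
           | some cs =>
               if !(chunksOkB (((PySem.Chars.splitOn s ['(']).headD []) :: cs)) then false
               else headLoopB s ["private".toList, "reduction".toList]) from rfl]
    rw [splitOn_eq s '(', hs]
    rfl
  rw [show omp_valid_pragma pragma =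
      (if !omp_valid_paren s then false
       else if ((PySem.List.enumerate s 0).filterMap
            (fun p => if p.2 == '(' then some p.1 else none)).any (fun idx =>
              pvClauseVars.all (fun c =>
                !(PySem.Chars.endswith (PySem.Chars.rstrip (PySem.Chars.slice s none (some idx))) c))) then
         false
       else ompHeadLoopA s (pvClauseVars.take 2)) from rfl]
  rw [hB]
  obtain ⟨P0, _⟩ := paren_seg s
  rw [hs] at P0
  simp only [List.headD_cons, List.tail_cons] at P0
  have hparen : omp_valid_paren s = ompValidParenLoop s 0 := rfl
  cases hb0 : (p0.count ')' == 0) with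
  | false =>
      have hin : PySem.Chars.isIn [')'] p0 = true := by
        rw [isIn_single_iff]
        apply List.count_pos_iff.mp
        simp at hb0
        omega
      simp only [hin, if_true]
      simp only [hparen, P0, hb0]
      simp
  | true =>
      have hin : PySem.Chars.isIn [')'] p0 = false := by
        rw [Bool.eq_false_iff]
        intro hmem
        rw [isIn_single_iff] at hmem
        have := List.count_pos_iff.mpr hmem
        simp at hb0
        omega
      simp only [hin, Bool.false_eq_true, if_false]
      rw [collectChunks_eq ps]
      cases hall : ps.all (fun p => p.count ')' == 1) with
      | false =>
          simp only [Bool.false_eq_true, if_false]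
          simp only [hparen, P0, hall]
          simp
      | true =>
          rw [if_pos rfl]
          simp only [hparen, P0, hb0, hall]
          simp only [Bool.and_true, Bool.not_true, Bool.false_eq_true, if_false]
          -- the per-'(' checks
          have hcnt : ∀ p ∈ ps, 1 ≤ p.count ')' := by
            intro p hp
            have := (List.all_eq_true.mp hall) p hp
            simp at this
            omega
          have hnp : ∀ p ∈ ps, '(' ∉ p := by
            intro p hp
            exact smAll_no_sep '(' s p (by rw [hs]; simp [hp])
          have hany := anyFail_eq s s 0 (by simp)
          simp only [Nat.cast_zero] at hany
          rw [hany]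
          have hopenP : openA s s 0 = openP [] s := by
            have := openA_eq_openP s s 0 (by simp) (by simp)
            simpa using this
          rw [hopenP]
          have hjoin := smAll_join '(' s
          rw [hs] at hjoin
          simp only [List.headD_cons, List.tail_cons] at hjoin
          have hop : openP [] s
              = ((p0 :: ps.map (fun p => p.drop ((PySem.Chars.find p [')']).toNat + 1))).dropLast).all
                  anyClauseOf := by
            conv_lhs => rw [hjoin]
            rw [openP_append_noParen p0 (smAll_no_sep '(' s p0 (by rw [hs]; simp)) [] _]
            simp only [List.nil_append]
            exact tail_full ps (fun p hp => ⟨hnp p hp, hcnt p hp⟩) p0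
          rw [hop]
          have hmap : ps.map (fun p => (PySem.Chars.splitOnMax p [')'] 1).getD 1 [])
              = ps.map (fun p => p.drop ((PySem.Chars.find p [')']).toNat + 1)) := by
            apply List.map_congr_left
            intro p hp
            exact after1B_eq p (hcnt p hp)
          have hchunks : chunksOkB
              (p0 :: ps.map (fun p => (PySem.Chars.splitOnMax p [')'] 1).getD 1 []))
              = ((p0 :: ps.map (fun p => p.drop ((PySem.Chars.find p [')']).toNat + 1))).dropLast).all
                  anyClauseOf := by
            rw [hmap]
            rfl
          rw [hchunks]
          cases hchk : ((p0 :: ps.map (fun p => p.drop ((PySem.Chars.find p [')']).toNat + 1))).dropLast).all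
              anyClauseOf with
          | false => simp
          | true =>
              simp only [Bool.not_true, Bool.false_eq_true, if_false]
              have hPtrue : ompValidParenLoop s 0 = true := by
                rw [P0, hb0, hall]
                simp
              have htake : pvClauseVars.take 2 = ["private".toList, "reduction".toList] := rfl
              rw [htake]
              exact head_eq s hPtrue _ (by decide)
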